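-- pv_equiv track=rewrite | github.com/PgmJun/CodingTest | 프로그래머스/카드 뭉치.py | solution
-- ===== SOURCE A (Python) =====
-- def solution(cards1, cards2, goal):
--     answer = 'Yes'
--     idx1 = 0
--     idx2 = 0
--
--     while True:
--         if len(goal) == 0:
--             break
--
--         word = goal[0]
--         if idx1 < len(cards1) and cards1[idx1] == word:
--             idx1 += 1
--             goal.remove(word)
--
--         elif idx2 < len(cards2) and cards2[idx2] == word:
--             idx2 += 1
--             goal.remove(word)
--
--         else:
--             answer = 'No'
--             break
--
--     return answer
-- ===== SOURCE B (Python) =====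
-- def solution(cards1, cards2, goal):
--     it1, it2 = iter(cards1), iter(cards2)
--     n1, n2 = next(it1, None), next(it2, None)
--     for w in goal:
--         if n1 == w:
--             n1 = next(it1, None)
--         elif n2 == w:
--             n2 = next(it2, None)
--         else:
--             return 'No'
--     return 'Yes'
-- ===== Notes on version B (the rewrite author's own statement) =====
-- stated objective: alternative
-- what changed: Replaced the while-True loop that repeatedly mutates goal via goal.remove (an O(n) scan-and-shift per matched word) with a single mutation-free for-loop over goal that advances two iterators over the card stacks; worst case drops from O(n^2) to O(n), but on random inputs (which usually fail early) the measured times are comparable.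
import Mathlib
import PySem

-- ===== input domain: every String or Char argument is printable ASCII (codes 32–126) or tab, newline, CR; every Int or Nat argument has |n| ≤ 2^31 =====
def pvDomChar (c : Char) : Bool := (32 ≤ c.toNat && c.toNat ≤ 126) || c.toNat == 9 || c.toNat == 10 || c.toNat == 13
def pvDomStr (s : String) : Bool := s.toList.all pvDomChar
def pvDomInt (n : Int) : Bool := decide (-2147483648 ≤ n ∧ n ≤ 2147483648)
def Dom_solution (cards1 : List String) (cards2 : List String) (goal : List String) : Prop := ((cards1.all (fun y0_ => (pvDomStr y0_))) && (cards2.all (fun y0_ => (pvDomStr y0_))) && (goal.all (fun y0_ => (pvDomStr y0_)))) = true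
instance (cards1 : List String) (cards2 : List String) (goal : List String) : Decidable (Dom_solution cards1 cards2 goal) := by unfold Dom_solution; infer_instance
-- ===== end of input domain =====

-- B replaces A's while-loop, which mutates goal via goal.remove at every matched word, by a
-- single mutation-free pass over goal with two iterators over the card stacks (alternative
-- structure, same measured cost on random inputs); A empties goal in place on success, B does
-- not touch it — the equivalence proved here is about the RETURN value only.
-- ===== PORT A =====
-- A's loop: while goal nonempty, word = goal[0]; cards1[idx1] is read only under the guard
-- idx1 < len(cards1), ported as the conjunction with cards1[idx1]? (exact for these in-range
-- nonnegative indices). goal.remove(word) removes the first occurrence of word, which is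
-- goal[0] itself, so it yields exactly the tail (PySem.List.remove?_cons_self).
def solGo (cards1 : List String) (cards2 : List String) : Nat → Nat → List String → String
  | _, _, [] => "Yes"
  | idx1, idx2, word :: rest =>
    if idx1 < cards1.length ∧ cards1[idx1]? = some word then
      solGo cards1 cards2 (idx1 + 1) idx2 rest
    else if idx2 < cards2.length ∧ cards2[idx2]? = some word then
      solGo cards1 cards2 idx1 (idx2 + 1) rest
    else "No"

def solution (cards1 : List String) (cards2 : List String) (goal : List String) : String :=
  solGo cards1 cards2 0 0 goal

-- ===== PORT B =====
-- B's iterators: next(it, None) over a list is exactly head?/tail on the remaining suffix.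
def altGo : List String → List String → List String → String
  | _, _, [] => "Yes"
  | c1, c2, w :: gs =>
    if c1.head? = some w then altGo c1.tail c2 gs
    else if c2.head? = some w then altGo c1 c2.tail gs
    else "No"

def solution_alt (cards1 : List String) (cards2 : List String) (goal : List String) : String :=
  altGo cards1 cards2 goal

-- ===== PRECONDITION & SPEC =====
def Spec_solution (cards1 : List String) (cards2 : List String) (goal : List String) (out : String) : Prop := out = solution_alt cards1 cards2 goal
instance (cards1 : List String) (cards2 : List String) (goal : List String) (out : String) : Decidable (Spec_solution cards1 cards2 goal out) := by unfold Spec_solution; infer_instance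

-- ===== CLAIM (what is proved, stated in full; the proofs are below) =====
def Claim_equal_solution : Prop := ∀ (cards1 : List String) (cards2 : List String) (goal : List String), Dom_solution cards1 cards2 goal → Spec_solution cards1 cards2 goal (solution cards1 cards2 goal)

-- ===== LEMMAS AND PROOFS =====

-- A's index i into a list is B's iterator positioned at the suffix `drop i`.
theorem solGo_eq_altGo (goal : List String) : ∀ (c1 c2 : List String) (i1 i2 : Nat),
    solGo c1 c2 i1 i2 goal = altGo (c1.drop i1) (c2.drop i2) goal := by
  induction goal with
  | nil => intro c1 c2 i1 i2; simp [solGo, altGo]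
  | cons w gs ih =>
    intro c1 c2 i1 i2
    have h1 : (i1 < c1.length ∧ c1[i1]? = some w) ↔ (c1.drop i1).head? = some w := by
      rw [List.head?_drop]
      constructor
      · exact fun h => h.2
      · intro h; exact ⟨(List.getElem?_eq_some_iff.mp h).1, h⟩
    have h2 : (i2 < c2.length ∧ c2[i2]? = some w) ↔ (c2.drop i2).head? = some w := by
      rw [List.head?_drop]
      constructor
      · exact fun h => h.2
      · intro h; exact ⟨(List.getElem?_eq_some_iff.mp h).1, h⟩
    simp only [solGo, altGo, h1, h2]
    split_ifs <;> first | rfl | (rw [ih, List.tail_drop])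

-- ===== VERDICT (by name: the statement is the Claim_ definition above) =====
theorem solution_spec : Claim_equal_solution := by
  intro cards1 cards2 goal _
  unfold Spec_solution solution solution_alt
  simpa using solGo_eq_altGo goal cards1 cards2 0 0
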